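-- pv_equiv track=rewrite | github.com/shutech2001/bibtex-formatter | bibtex_formatter.py | _tokenize_outside_braces
-- ===== SOURCE A (Python) =====
-- def _tokenize_outside_braces(s: str) -> list[str]:
--     """
--     Split by whitespace, but keep brace groups as single tokens.
--     Example: "Mark {van der Laan}" -> ["Mark", "{van der Laan}"]
--     """
--     tokens: list[str] = []
--     i = 0
--     n = len(s)
--
--     while i < n:
--         # skip spaces and BibTeX non-breaking space (~)
--         if s[i].isspace() or s[i] == "~":
--             i += 1
--             continue
--
--         if s[i] == "{":
--             # parse balanced brace group (with nesting)
--             j = i + 1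
--             depth = 1
--             while j < n and depth > 0:
--                 if s[j] == "{":
--                     depth += 1
--                 elif s[j] == "}":
--                     depth -= 1
--                 j += 1
--             tokens.append(s[i:j])  # keep braces
--             i = j
--             continue
--
--         # normal token until whitespace or '~'
--         j = i
--         while j < n and (not s[j].isspace()) and s[j] != "~":
--             # do not start a brace group here; it becomes its own token in next loop
--             if s[j] == "{":
--                 break
--             j += 1
--         tokens.append(s[i:j])
--         i = j
--
--     return tokens
-- ===== SOURCE B (Python) =====
-- def _tokenize_outside_braces(s: str) -> list[str]:
--     """Single pass over the characters with a token buffer and a brace depth."""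
--     tokens: list[str] = []
--     buf: list[str] = []
--     depth = 0
--     for ch in s:
--         if depth > 0:
--             buf.append(ch)
--             if ch == "{":
--                 depth += 1
--             elif ch == "}":
--                 depth -= 1
--                 if depth == 0:
--                     tokens.append("".join(buf))
--                     buf = []
--         elif ch == "{":
--             if buf:
--                 tokens.append("".join(buf))
--             buf = [ch]
--             depth = 1
--         elif ch.isspace() or ch == "~":
--             if buf:
--                 tokens.append("".join(buf))
--                 buf = []
--         else:
--             buf.append(ch)
--     if buf:
--         tokens.append("".join(buf))
--     return tokens
-- ===== Notes on version B (the rewrite author's own statement) =====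
-- stated objective: idiomatic
-- what changed: Replaced the index-based outer loop with its two nested index-scanning inner loops and slicing by a single flat pass over the characters maintaining a token buffer and an integer brace depth, flushing the buffer at token boundaries.
import Mathlib
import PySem

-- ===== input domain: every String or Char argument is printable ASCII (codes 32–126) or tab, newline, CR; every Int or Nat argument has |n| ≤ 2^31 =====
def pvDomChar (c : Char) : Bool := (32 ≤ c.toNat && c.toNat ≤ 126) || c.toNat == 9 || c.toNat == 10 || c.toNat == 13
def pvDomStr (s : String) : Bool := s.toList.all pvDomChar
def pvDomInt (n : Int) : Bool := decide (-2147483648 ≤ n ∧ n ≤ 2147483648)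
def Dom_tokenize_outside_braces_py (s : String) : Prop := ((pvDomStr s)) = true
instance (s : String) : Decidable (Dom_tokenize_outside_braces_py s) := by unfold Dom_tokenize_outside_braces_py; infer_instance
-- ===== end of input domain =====

-- B is a single flat pass with a token buffer and a brace depth instead of A's index scans and slices (idiomatic; same O(n) cost).

-- ===== PORT A =====
-- inner 'while j < n and depth > 0' brace-scanning loop of A (fuel = n - j bounds the remaining iterations)
def pvABraceEnd (cs : List Char) (n : Nat) : Nat → Nat → Nat → Nat
  | 0, j, _ => j
  | fuel+1, j, depth =>
    if j < n ∧ 0 < depth then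
      if cs.getD j ' ' == '{' then pvABraceEnd cs n fuel (j+1) (depth+1)
      else if cs.getD j ' ' == '}' then pvABraceEnd cs n fuel (j+1) (depth-1)
      else pvABraceEnd cs n fuel (j+1) depth
    else j

-- inner 'while j < n and not isspace and != ~ (break on {)' token-scanning loop of A (fuel = n - j)
def pvATokEnd (cs : List Char) (n : Nat) : Nat → Nat → Nat
  | 0, j => j
  | fuel+1, j =>
    if j < n then
      if PySem.Chars.isspace (cs.getD j ' ') || cs.getD j ' ' == '~' then j
      else if cs.getD j ' ' == '{' then j
      else pvATokEnd cs n fuel (j+1)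
    else j

-- outer 'while i < n' loop of A (fuel = n - i; i strictly increases each iteration)
def pvALoop (cs : List Char) (n : Nat) : Nat → Nat → List String → List String
  | 0, _, tokens => tokens
  | fuel+1, i, tokens =>
    if i < n then
      if PySem.Chars.isspace (cs.getD i ' ') || cs.getD i ' ' == '~' then pvALoop cs n fuel (i+1) tokens
      else if cs.getD i ' ' == '{' then
        pvALoop cs n fuel (pvABraceEnd cs n (n - (i+1)) (i+1) 1)
          (tokens ++ [String.mk (PySem.List.slice cs (some (i:Int)) (some ((pvABraceEnd cs n (n - (i+1)) (i+1) 1 : Nat):Int)))])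
      else
        pvALoop cs n fuel (pvATokEnd cs n (n - i) i)
          (tokens ++ [String.mk (PySem.List.slice cs (some (i:Int)) (some ((pvATokEnd cs n (n - i) i : Nat):Int)))])
    else tokens

def tokenize_outside_braces_py (s : String) : List String :=
  pvALoop s.toList s.toList.length s.toList.length 0 []

-- ===== PORT B =====
-- one step of B's flat loop; state = (tokens, buf, depth)
def pvStep (st : List String × List Char × Nat) (c : Char) : List String × List Char × Nat :=
  let (tokens, buf, depth) := st
  if 0 < depth then
    let buf' := buf ++ [c]
    if c == '{' then (tokens, buf', depth + 1)
    else if c == '}' then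
      if depth - 1 = 0 then (tokens ++ [String.mk buf'], [], 0)
      else (tokens, buf', depth - 1)
    else (tokens, buf', depth)
  else if c == '{' then
    ((if buf.isEmpty then tokens else tokens ++ [String.mk buf]), [c], 1)
  else if PySem.Chars.isspace c || c == '~' then
    (if buf.isEmpty then (tokens, buf, 0) else (tokens ++ [String.mk buf], [], 0))
  else (tokens, buf ++ [c], 0)

def tokenize_outside_braces_py_alt (s : String) : List String :=
  if (s.toList.foldl pvStep ([], [], 0)).2.1.isEmpty then (s.toList.foldl pvStep ([], [], 0)).1
  else (s.toList.foldl pvStep ([], [], 0)).1 ++ [String.mk (s.toList.foldl pvStep ([], [], 0)).2.1]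

-- ===== PRECONDITION & SPEC =====
def Spec_tokenize_outside_braces_py (s : String) (out : List String) : Prop := out = tokenize_outside_braces_py_alt s
instance (s : String) (out : List String) : Decidable (Spec_tokenize_outside_braces_py s out) := by unfold Spec_tokenize_outside_braces_py; infer_instance

-- ===== CLAIM (what is proved, stated in full; the proofs are below) =====
def Claim_equal_tokenize_outside_braces_py : Prop := ∀ (s : String), Dom_tokenize_outside_braces_py s → Spec_tokenize_outside_braces_py s (tokenize_outside_braces_py s)

-- ===== LEMMAS AND PROOFS =====

-- a character that may continue a plain token
def pvTokChar (c : Char) : Bool := !(PySem.Chars.isspace c) && !(c == '~') && !(c == '{')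

-- the brace group read at depth d: (group chars consumed, remainder)
def pvGrab : Nat → List Char → List Char × List Char
  | _, [] => ([], [])
  | d, c :: cs =>
    if c = '{' then
      let p := pvGrab (d+1) cs
      (c :: p.1, p.2)
    else if c = '}' then
      if d ≤ 1 then ([c], cs)
      else
        let p := pvGrab (d-1) cs
        (c :: p.1, p.2)
    else
      let p := pvGrab d cs
      (c :: p.1, p.2)

theorem pvGrab_append (d : Nat) (cs : List Char) : (pvGrab d cs).1 ++ (pvGrab d cs).2 = cs := by
  induction cs generalizing d with
  | nil => simp [pvGrab]
  | cons c cs ih =>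
    simp only [pvGrab]
    split_ifs <;> simp [ih]

theorem pvGrab_snd_length (d : Nat) (cs : List Char) : (pvGrab d cs).2.length ≤ cs.length := by
  have h := congrArg List.length (pvGrab_append d cs)
  simp only [List.length_append] at h
  omega

-- the reference tokenizer both ports are proved equal to
def pvT : List Char → List String
  | [] => []
  | c :: cs =>
    if PySem.Chars.isspace c || c == '~' then pvT cs
    else if c == '{' then
      String.mk (c :: (pvGrab 1 cs).1) :: pvT ((pvGrab 1 cs).2)
    else
      String.mk (c :: cs.takeWhile pvTokChar) :: pvT (cs.dropWhile pvTokChar)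
termination_by cs => cs.length
decreasing_by
  · simp
  · have := pvGrab_snd_length 1 cs; simp; omega
  · have := cs.length_dropWhile_le pvTokChar; simp; omega

theorem pvABraceEnd_zero_depth (cs : List Char) (n : Nat) : ∀ (fuel j : Nat), pvABraceEnd cs n fuel j 0 = j := by
  intro fuel j
  cases fuel <;> simp [pvABraceEnd]

theorem pvA_braceEnd_eq (cs : List Char) : ∀ (fuel j d : Nat), cs.length - j ≤ fuel →
    pvABraceEnd cs cs.length fuel j (d+1) = j + (pvGrab (d+1) (cs.drop j)).1.length := by
  intro fuel
  induction fuel with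
  | zero =>
    intro j d h
    rw [List.drop_eq_nil_of_le (by omega)]
    simp [pvABraceEnd, pvGrab]
  | succ fuel ih =>
    intro j d h
    by_cases hj : j < cs.length
    · have hdrop : cs.drop j = cs[j] :: cs.drop (j+1) := (List.getElem_cons_drop hj).symm
      have hget : cs.getD j ' ' = cs[j] := List.getD_eq_getElem cs ' ' hj
      simp only [pvABraceEnd]
      rw [if_pos ⟨hj, by omega⟩, hget, hdrop]
      by_cases h1 : cs[j] = '{'
      · rw [if_pos (by simpa using h1)]
        rw [ih (j+1) (d+1) (by omega)]
        simp [pvGrab, h1]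
        omega
      · rw [if_neg (by simpa using h1)]
        by_cases h2 : cs[j] = '}'
        · rw [if_pos (by simpa using h2)]
          rcases d with _ | d
          · rw [pvABraceEnd_zero_depth]
            simp [pvGrab, h2]
          · rw [show d + 1 + 1 - 1 = d + 1 by omega, ih (j+1) d (by omega)]
            simp [pvGrab, h2]
            omega
        · rw [if_neg (by simpa using h2)]
          rw [ih (j+1) d (by omega)]
          simp [pvGrab, h1, h2]
          omega
    · simp only [pvABraceEnd]
      rw [if_neg (by omega), List.drop_eq_nil_of_le (by omega)]
      simp [pvGrab]

theorem pvA_tokEnd_eq (cs : List Char) : ∀ (fuel j : Nat), cs.length - j ≤ fuel →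
    pvATokEnd cs cs.length fuel j = j + ((cs.drop j).takeWhile pvTokChar).length := by
  intro fuel
  induction fuel with
  | zero =>
    intro j h
    rw [List.drop_eq_nil_of_le (by omega)]
    simp [pvATokEnd]
  | succ fuel ih =>
    intro j h
    by_cases hj : j < cs.length
    · have hdrop : cs.drop j = cs[j] :: cs.drop (j+1) := (List.getElem_cons_drop hj).symm
      have hget : cs.getD j ' ' = cs[j] := List.getD_eq_getElem cs ' ' hj
      simp only [pvATokEnd]
      rw [if_pos hj, hget, hdrop]
      by_cases h1 : (PySem.Chars.isspace cs[j] || cs[j] == '~') = true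
      · rw [if_pos h1]
        rw [List.takeWhile_cons_of_neg (by
          simp only [Bool.or_eq_true, beq_iff_eq] at h1
          rw [Bool.not_eq_true]
          rcases h1 with hx | hx <;> simp [pvTokChar, hx])]
        simp
      · rw [if_neg h1]
        by_cases h2 : cs[j] = '{'
        · rw [if_pos (by simpa using h2)]
          rw [List.takeWhile_cons_of_neg (by simp [pvTokChar, h2])]
          simp
        · rw [if_neg (by simpa using h2)]
          rw [ih (j+1) (by omega)]
          rw [List.takeWhile_cons_of_pos (by
            simp only [Bool.or_eq_true, beq_iff_eq, not_or, Bool.not_eq_true] at h1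
            simp [pvTokChar, h1.1, h1.2, h2])]
          simp
          omega
    · simp only [pvATokEnd]
      rw [if_neg (by omega), List.drop_eq_nil_of_le (by omega)]
      simp

theorem pvA_loop_eq (cs : List Char) : ∀ (fuel i : Nat) (tok : List String), cs.length - i ≤ fuel → i ≤ cs.length →
    pvALoop cs cs.length fuel i tok = tok ++ pvT (cs.drop i) := by
  intro fuel
  induction fuel with
  | zero =>
    intro i tok h hle
    rw [List.drop_eq_nil_of_le (by omega)]
    simp [pvALoop, pvT]
  | succ fuel ih =>
    intro i tok h hle
    by_cases hi : i < cs.length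
    · have hdrop : cs.drop i = cs[i] :: cs.drop (i+1) := (List.getElem_cons_drop hi).symm
      have hget : cs.getD i ' ' = cs[i] := List.getD_eq_getElem cs ' ' hi
      simp only [pvALoop]
      rw [if_pos hi, hget]
      by_cases h1 : (PySem.Chars.isspace cs[i] || cs[i] == '~') = true
      · rw [if_pos h1, ih (i+1) tok (by omega) (by omega), hdrop]
        simp only [pvT]
        rw [if_pos h1]
      · rw [if_neg h1]
        by_cases h2 : cs[i] = '{'
        · rw [if_pos (by simpa using h2)]
          have hbe := pvA_braceEnd_eq cs (cs.length - (i+1)) (i+1) 0 le_rfl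
          simp only [Nat.zero_add] at hbe
          obtain ⟨g, r, hgr⟩ : ∃ g r, pvGrab 1 (cs.drop (i+1)) = (g, r) := ⟨_, _, rfl⟩
          rw [hgr] at hbe
          have hbe' : pvABraceEnd cs cs.length (cs.length - (i+1)) (i+1) 1 = i + 1 + g.length := by
            simpa using hbe
          have hga : g ++ r = cs.drop (i+1) := by
            have hx := pvGrab_append 1 (cs.drop (i+1))
            rw [hgr] at hx
            exact hx
          have hlen : g.length + r.length = cs.length - (i+1) := by
            have hx := congrArg List.length hga
            simp only [List.length_append, List.length_drop] at hx
            omega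
          have hslice : PySem.List.slice cs (some (i:Int))
                (some ((pvABraceEnd cs cs.length (cs.length - (i+1)) (i+1) 1 : Nat):Int))
              = cs[i] :: g := by
            rw [hbe', PySem.List.slice_natCast, hdrop, ← hga,
              show (i + 1 + g.length) - i = g.length + 1 by omega,
              List.take_succ_cons, List.take_left]
          have hdropj : cs.drop (pvABraceEnd cs cs.length (cs.length - (i+1)) (i+1) 1) = r := by
            rw [hbe', ← List.drop_drop, ← hga, List.drop_left]
          rw [hslice, ih (pvABraceEnd cs cs.length (cs.length - (i+1)) (i+1) 1) _ (by rw [hbe']; omega)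
            (by rw [hbe']; omega), hdropj]
          conv_rhs => rw [hdrop]
          simp only [pvT]
          rw [if_neg h1, if_pos (by simpa using h2), hgr]
          simp
        · rw [if_neg (by simpa using h2)]
          have hte := pvA_tokEnd_eq cs (cs.length - i) i le_rfl
          have hptc : pvTokChar cs[i] = true := by
            simp only [Bool.or_eq_true, beq_iff_eq, not_or, Bool.not_eq_true] at h1
            simp [pvTokChar, h1.1, h1.2, h2]
          have htw : (cs.drop i).takeWhile pvTokChar = cs[i] :: (cs.drop (i+1)).takeWhile pvTokChar := by
            rw [hdrop, List.takeWhile_cons_of_pos hptc]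
          have hlen2 : ((cs.drop i).takeWhile pvTokChar).length ≤ cs.length - i := by
            have hx := (List.takeWhile_prefix (l := cs.drop i) (p := pvTokChar)).length_le
            simpa using hx
          have hslice : PySem.List.slice cs (some (i:Int)) (some ((pvATokEnd cs cs.length (cs.length - i) i : Nat):Int))
              = (cs.drop i).takeWhile pvTokChar := by
            rw [hte, PySem.List.slice_natCast,
              show (i + ((cs.drop i).takeWhile pvTokChar).length) - i
                = ((cs.drop i).takeWhile pvTokChar).length by omega]
            exact (List.prefix_iff_eq_take.mp (List.takeWhile_prefix _)).symm
          have hdropj : cs.drop (pvATokEnd cs cs.length (cs.length - i) i) = (cs.drop i).dropWhile pvTokChar := by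
            rw [hte, ← List.drop_drop]
            nth_rewrite 2 [← List.takeWhile_append_dropWhile (p := pvTokChar) (l := cs.drop i)]
            exact List.drop_left
          rw [hslice, ih (pvATokEnd cs cs.length (cs.length - i) i) _
            (by rw [hte, htw]; simp only [List.length_cons]; omega)
            (by rw [hte]; omega), hdropj]
          conv_rhs => rw [hdrop]
          simp only [pvT]
          rw [if_neg h1, if_neg (by simpa using h2)]
          rw [htw, hdrop, List.dropWhile_cons_of_pos hptc]
          simp
    · simp only [pvALoop]
      rw [if_neg (by omega), List.drop_eq_nil_of_le (by omega)]
      simp [pvT]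

theorem pvB_main : ∀ (n : Nat) (cs : List Char), cs.length ≤ n →
    (∀ tok : List String,
      (if (cs.foldl pvStep (tok, [], 0)).2.1.isEmpty then (cs.foldl pvStep (tok, [], 0)).1
       else (cs.foldl pvStep (tok, [], 0)).1 ++ [String.mk (cs.foldl pvStep (tok, [], 0)).2.1])
        = tok ++ pvT cs)
    ∧ (∀ (d : Nat) (buf : List Char) (tok : List String), buf ≠ [] →
      (if (cs.foldl pvStep (tok, buf, d+1)).2.1.isEmpty then (cs.foldl pvStep (tok, buf, d+1)).1
       else (cs.foldl pvStep (tok, buf, d+1)).1 ++ [String.mk (cs.foldl pvStep (tok, buf, d+1)).2.1])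
        = tok ++ String.mk (buf ++ (pvGrab (d+1) cs).1) :: pvT ((pvGrab (d+1) cs).2))
    ∧ (∀ (buf : List Char) (tok : List String), buf ≠ [] →
      (if (cs.foldl pvStep (tok, buf, 0)).2.1.isEmpty then (cs.foldl pvStep (tok, buf, 0)).1
       else (cs.foldl pvStep (tok, buf, 0)).1 ++ [String.mk (cs.foldl pvStep (tok, buf, 0)).2.1])
        = tok ++ String.mk (buf ++ cs.takeWhile pvTokChar) :: pvT (cs.dropWhile pvTokChar)) := by
  intro n
  induction n with
  | zero =>
    intro cs h
    have hcs : cs = [] := List.eq_nil_of_length_eq_zero (by omega)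
    subst hcs
    refine ⟨fun tok => by simp [pvT], fun d buf tok hbuf => by simp [pvT, pvGrab, hbuf],
      fun buf tok hbuf => by simp [pvT, hbuf]⟩
  | succ n ihn =>
    intro cs h
    cases cs with
    | nil =>
      refine ⟨fun tok => by simp [pvT], fun d buf tok hbuf => by simp [pvT, pvGrab, hbuf],
        fun buf tok hbuf => by simp [pvT, hbuf]⟩
    | cons c cs =>
      obtain ⟨ih0, ih1, ih2⟩ := ihn cs (by simp at h; omega)
      refine ⟨?_, ?_, ?_⟩
      · intro tok
        by_cases hc : c = '{'
        · have hstep : pvStep (tok, ([], 0)) c = (tok, ([c], 1)) := by simp [pvStep, hc]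
          rw [List.foldl_cons, hstep, ih1 0 [c] tok (by simp)]
          subst hc
          simp only [pvT]
          rw [if_neg (by decide), if_pos (by decide)]
          simp
        · by_cases hw : (PySem.Chars.isspace c || c == '~') = true
          · have hstep : pvStep (tok, ([], 0)) c = (tok, ([], 0)) := by
              simp [pvStep, hc, hw]
            rw [List.foldl_cons, hstep, ih0 tok]
            simp only [pvT]
            rw [if_pos hw]
          · have hstep : pvStep (tok, ([], 0)) c = (tok, ([c], 0)) := by
              simp only [Bool.or_eq_true, beq_iff_eq, not_or, Bool.not_eq_true] at hw
              simp [pvStep, hc, hw.1, hw.2]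
            rw [List.foldl_cons, hstep, ih2 [c] tok (by simp)]
            simp only [pvT]
            rw [if_neg (by simpa using hw), if_neg (by simpa using hc)]
            simp
      · intro d buf tok hbuf
        by_cases hc : c = '{'
        · have hstep : pvStep (tok, (buf, d+1)) c = (tok, (buf ++ [c], d+2)) := by
            simp [pvStep, hc]
          rw [List.foldl_cons, hstep, ih1 (d+1) (buf ++ [c]) tok (by simp)]
          subst hc
          simp [pvGrab]
        · by_cases hc2 : c = '}'
          · rcases d with _ | d
            · have hstep : pvStep (tok, (buf, 1)) c = (tok ++ [String.mk (buf ++ [c])], ([], 0)) := by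
                simp [pvStep, hc2]
              rw [List.foldl_cons, hstep, ih0 (tok ++ [String.mk (buf ++ [c])])]
              subst hc2
              simp [pvGrab]
            · have hstep : pvStep (tok, (buf, d+2)) c = (tok, (buf ++ [c], d+1)) := by
                simp [pvStep, hc2]
              rw [List.foldl_cons, hstep, ih1 d (buf ++ [c]) tok (by simp)]
              subst hc2
              simp [pvGrab]
          · have hstep : pvStep (tok, (buf, d+1)) c = (tok, (buf ++ [c], d+1)) := by
              simp [pvStep, hc, hc2]
            rw [List.foldl_cons, hstep, ih1 d (buf ++ [c]) tok (by simp)]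
            simp [pvGrab, hc, hc2]
      · intro buf tok hbuf
        by_cases hc : c = '{'
        · have hstep : pvStep (tok, (buf, 0)) c = (tok ++ [String.mk buf], ([c], 1)) := by
            simp [pvStep, hc, hbuf]
          rw [List.foldl_cons, hstep, ih1 0 [c] (tok ++ [String.mk buf]) (by simp)]
          subst hc
          rw [List.takeWhile_cons_of_neg (by decide), List.dropWhile_cons_of_neg (by decide)]
          simp only [pvT]
          rw [if_neg (by decide), if_pos (by decide)]
          simp
        · by_cases hw : (PySem.Chars.isspace c || c == '~') = true
          · have hstep : pvStep (tok, (buf, 0)) c = (tok ++ [String.mk buf], ([], 0)) := by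
              simp [pvStep, hc, hw, hbuf]
            rw [List.foldl_cons, hstep, ih0 (tok ++ [String.mk buf])]
            have hptF : pvTokChar c = false := by
              simp only [Bool.or_eq_true, beq_iff_eq] at hw
              rcases hw with hx | hx <;> simp [pvTokChar, hx]
            rw [List.takeWhile_cons_of_neg (by simp [hptF]), List.dropWhile_cons_of_neg (by simp [hptF])]
            simp only [pvT]
            rw [if_pos hw]
            simp
          · have hptT : pvTokChar c = true := by
              simp only [Bool.or_eq_true, beq_iff_eq, not_or, Bool.not_eq_true] at hw
              simp [pvTokChar, hw.1, hw.2, hc]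
            have hstep : pvStep (tok, (buf, 0)) c = (tok, (buf ++ [c], 0)) := by
              simp only [Bool.or_eq_true, beq_iff_eq, not_or, Bool.not_eq_true] at hw
              simp [pvStep, hc, hw.1, hw.2]
            rw [List.foldl_cons, hstep, ih2 (buf ++ [c]) tok (by simp)]
            rw [List.takeWhile_cons_of_pos hptT, List.dropWhile_cons_of_pos hptT]
            simp

-- ===== VERDICT (by name: the statement is the Claim_ definition above) =====
theorem tokenize_outside_braces_py_spec : Claim_equal_tokenize_outside_braces_py := by
  intro s _
  unfold Spec_tokenize_outside_braces_py tokenize_outside_braces_py tokenize_outside_braces_py_alt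
  have hA := pvA_loop_eq s.toList s.toList.length 0 [] le_rfl (by omega)
  have hB := (pvB_main s.toList.length s.toList le_rfl).1 []
  simp only [List.drop_zero, List.nil_append] at hA hB
  rw [hA, ← hB]
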